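-- pv_equiv track=rewrite | github.com/pypi-data/pypi-mirror-353 | packages/digi-solver/digi_solver-0.1.8.tar.gz/digi_solver-0.1.8/ncalc_python/conversions.py | octal_to_binary
-- ===== SOURCE A (Python) =====
-- def octal_to_binary(octal_str):
--     """Converts an octal string to a binary string."""
--     try:
--         if not octal_str: return "Error: Empty octal input"
--         if not all(c in '01234567' for c in octal_str):
--             return f"Error: Invalid octal digit in '{octal_str}'"
--         decimal_val = int(octal_str, 8)
--         if decimal_val == 0: return "0"
--         return bin(decimal_val)[2:]
--     except ValueError:
--         return f"Error: Invalid octal input '{octal_str}'"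
-- ===== SOURCE B (Python) =====
-- _OCT = {'0': '000', '1': '001', '2': '010', '3': '011',
--         '4': '100', '5': '101', '6': '110', '7': '111'}
--
-- def octal_to_binary(octal_str):
--     """Converts an octal string to a binary string."""
--     if not octal_str: return "Error: Empty octal input"
--     if not all(c in '01234567' for c in octal_str):
--         return f"Error: Invalid octal digit in '{octal_str}'"
--     bits = ''.join(_OCT[c] for c in octal_str).lstrip('0')
--     return bits if bits else "0"
-- ===== Notes on version B (the rewrite author's own statement) =====
-- stated objective: alternative
-- what changed: B replaces the numeric base conversion (int(s,8) then bin()) by a per-digit 3-bit table expansion joined and left-stripped of zeros.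
import Mathlib
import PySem

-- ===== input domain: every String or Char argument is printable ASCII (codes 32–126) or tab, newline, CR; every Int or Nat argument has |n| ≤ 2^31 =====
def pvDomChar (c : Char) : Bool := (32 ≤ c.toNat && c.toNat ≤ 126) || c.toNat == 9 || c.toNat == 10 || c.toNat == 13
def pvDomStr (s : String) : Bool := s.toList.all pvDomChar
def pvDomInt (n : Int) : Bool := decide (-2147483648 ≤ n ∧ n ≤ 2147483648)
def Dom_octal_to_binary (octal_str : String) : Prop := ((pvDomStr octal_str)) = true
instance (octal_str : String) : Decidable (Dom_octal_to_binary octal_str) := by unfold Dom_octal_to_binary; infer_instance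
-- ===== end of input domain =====

-- B converts per octal digit through a 3-bit table and strips leading zeros instead of
-- going through int(s, 8) and bin(); same guards and error strings. (objective: alternative)

-- ===== PORT A =====
-- int(s, 8) on an all-octal-digit string: left fold acc*8 + digit (exact there)
def pvOctFold (l : List Char) : Nat := l.foldl (fun a c => a * 8 + (c.toNat - 48)) 0

-- bin(n)[2:] for n ≥ 1: recursive binary digits, most significant first (exact for n ≥ 1)
def pvBinChars : Nat → List Char
  | 0 => []
  | 1 => ['1']
  | (n+2) => pvBinChars ((n+2) / 2) ++ [if (n+2) % 2 = 1 then '1' else '0']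
decreasing_by omega

def octal_to_binary (octal_str : String) : String :=
  if octal_str.toList = [] then "Error: Empty octal input"
  else if ¬ (octal_str.toList.all (fun c => c ∈ "01234567".toList)) then
    "Error: Invalid octal digit in '" ++ octal_str ++ "'"
  else
    let decimal_val := pvOctFold octal_str.toList
    if decimal_val = 0 then "0"
    else String.mk (pvBinChars decimal_val)

-- ===== PORT B =====
-- the _OCT table
def pvOct3 (c : Char) : List Char :=
  if c = '0' then ['0','0','0'] else if c = '1' then ['0','0','1']
  else if c = '2' then ['0','1','0'] else if c = '3' then ['0','1','1']
  else if c = '4' then ['1','0','0'] else if c = '5' then ['1','0','1']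
  else if c = '6' then ['1','1','0'] else if c = '7' then ['1','1','1']
  else []

def octal_to_binary_alt (octal_str : String) : String :=
  if octal_str.toList = [] then "Error: Empty octal input"
  else if ¬ (octal_str.toList.all (fun c => c ∈ "01234567".toList)) then
    "Error: Invalid octal digit in '" ++ octal_str ++ "'"
  else
    let bits := (octal_str.toList.flatMap pvOct3).dropWhile (fun c => c = '0')
    if bits = [] then "0" else String.mk bits

-- ===== PRECONDITION & SPEC =====
def Spec_octal_to_binary (octal_str : String) (out : String) : Prop := out = octal_to_binary_alt octal_str
instance (octal_str : String) (out : String) : Decidable (Spec_octal_to_binary octal_str out) := by unfold Spec_octal_to_binary; infer_instance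

-- ===== CLAIM (what is proved, stated in full; the proofs are below) =====
def Claim_equal_octal_to_binary : Prop := ∀ (octal_str : String), Dom_octal_to_binary octal_str → Spec_octal_to_binary octal_str (octal_to_binary octal_str)

-- ===== LEMMAS AND PROOFS =====

theorem pvBinChars_double (m b : Nat) (hm : 1 ≤ m) (hb : b < 2) :
    pvBinChars (2 * m + b) = pvBinChars m ++ [if b = 1 then '1' else '0'] := by
  obtain ⟨k, hk⟩ : ∃ k, 2 * m + b = k + 2 := ⟨2 * m + b - 2, by omega⟩
  rw [hk, pvBinChars]
  have h1 : (k + 2) / 2 = m := by omega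
  have h2 : (k + 2) % 2 = b := by omega
  rw [h1, h2]

theorem pvBinChars_nil (n : Nat) : pvBinChars n = [] ↔ n = 0 := by
  match n with
  | 0 => simp [pvBinChars]
  | 1 => simp [pvBinChars]
  | (k+2) => simp [pvBinChars]

theorem pvOctChars : "01234567".toList = ['0','1','2','3','4','5','6','7'] := rfl

theorem pvBinChars_oct (a : Nat) (c : Char) (ha : 1 ≤ a)
    (hc : c ∈ ['0','1','2','3','4','5','6','7']) :
    pvBinChars (a * 8 + (c.toNat - 48)) = pvBinChars a ++ pvOct3 c := by
  have hstep : ∀ d, d < 8 →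
      pvBinChars (a * 8 + d) =
        pvBinChars a ++ [if d / 4 = 1 then '1' else '0', if d / 2 % 2 = 1 then '1' else '0',
          if d % 2 = 1 then '1' else '0'] := by
    intro d hd
    have e1 : a * 8 + d = 2 * (2 * (2 * a + d / 4) + d / 2 % 2) + d % 2 := by omega
    rw [e1, pvBinChars_double _ _ (by omega) (by omega),
        pvBinChars_double _ _ (by omega) (by omega),
        pvBinChars_double _ _ ha (by omega)]
    simp
  fin_cases hc
  · simpa [pvOct3] using hstep 0 (by norm_num)
  · simpa [pvOct3] using hstep 1 (by norm_num)
  · simpa [pvOct3] using hstep 2 (by norm_num)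
  · simpa [pvOct3] using hstep 3 (by norm_num)
  · simpa [pvOct3] using hstep 4 (by norm_num)
  · simpa [pvOct3] using hstep 5 (by norm_num)
  · simpa [pvOct3] using hstep 6 (by norm_num)
  · simpa [pvOct3] using hstep 7 (by norm_num)

theorem pvOctFold_go (l : List Char) : ∀ acc, 1 ≤ acc → (∀ c ∈ l, c ∈ ['0','1','2','3','4','5','6','7']) →
    pvBinChars (l.foldl (fun a c => a * 8 + (c.toNat - 48)) acc) =
      pvBinChars acc ++ l.flatMap pvOct3 := by
  induction l with
  | nil => intro acc _ _; simp
  | cons c l ih =>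
    intro acc hacc hmem
    have hc : c ∈ ['0','1','2','3','4','5','6','7'] := hmem c (List.mem_cons_self ..)
    have hd : c.toNat - 48 < 8 := by fin_cases hc <;> decide
    simp only [List.foldl_cons, List.flatMap_cons]
    rw [ih (acc * 8 + (c.toNat - 48)) (by omega)
        (fun x hx => hmem x (List.mem_cons_of_mem _ hx)),
      pvBinChars_oct acc c hacc hc, List.append_assoc]

theorem pvMain (l : List Char) (h : ∀ c ∈ l, c ∈ ['0','1','2','3','4','5','6','7']) :
    (l.flatMap pvOct3).dropWhile (fun c => c = '0') = pvBinChars (pvOctFold l) := by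
  induction l with
  | nil => simp [pvOctFold, pvBinChars]
  | cons c l ih =>
    have hc : c ∈ ['0','1','2','3','4','5','6','7'] := h c (List.mem_cons_self ..)
    have hrest : ∀ x ∈ l, x ∈ ['0','1','2','3','4','5','6','7'] := fun x hx => h x (List.mem_cons_of_mem _ hx)
    simp only [pvOctFold, List.foldl_cons, List.flatMap_cons] at *
    by_cases h0 : c = '0'
    · subst h0
      simpa [pvOct3, List.dropWhile] using ih hrest
    · have hc' : c ∈ ['1','2','3','4','5','6','7'] := by fin_cases hc <;> simp_all
      rw [pvOctFold_go l (0 * 8 + (c.toNat - 48)) (by fin_cases hc' <;> decide) hrest]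
      fin_cases hc' <;> simp [pvOct3, List.dropWhile, pvBinChars]

-- ===== VERDICT (by name: the statement is the Claim_ definition above) =====
theorem octal_to_binary_spec : Claim_equal_octal_to_binary := by
  intro s _
  unfold Spec_octal_to_binary octal_to_binary octal_to_binary_alt
  split_ifs with h1 h2 <;> try rfl
  rw [List.all_eq_true] at h2
  simp only
  rw [pvMain s.toList (by intro c hcm; have := h2 c hcm; rw [pvOctChars] at this; simpa using this)]
  rcases Nat.eq_zero_or_pos (pvOctFold s.toList) with h | h
  · simp [h, pvBinChars]
  · have := (pvBinChars_nil (pvOctFold s.toList)).not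
    split_ifs with h3 h4 <;> simp_all
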